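-- pv_equiv track=rewrite | github.com/ASPP/pelita | pelita/player/team.py | split_layout_str
-- ===== SOURCE A (Python) =====
-- def split_layout_str(layout_str):
--     """ Turns a layout string containing many layouts into a list
--     of simple layouts.
--     """
--     out = []
--     current_layout = []
--     for row in layout_str.splitlines():
--         stripped = row.strip()
--         if not stripped:
--             # found an empty line
--             # if we have a current_layout, append it to out
--             # and reset it
--             if current_layout:
--                 out.append(current_layout)
--                 current_layout = []
--             continue
--         # non-empty line: append to current_layout
--         current_layout.append(row)
--
--     # We still have a current layout at the end: append
--     if current_layout:
--         out.append(current_layout)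
--
--     return ['\n'.join(l) for l in out]
-- ===== SOURCE B (Python) =====
-- def split_layout_str(layout_str):
--     """ Turns a layout string containing many layouts into a list
--     of simple layouts.
--     """
--     lines = layout_str.splitlines()
--     n = len(lines)
--     out = []
--     i = 0
--     while i < n:
--         if not lines[i].strip():
--             i += 1
--         else:
--             j = i + 1
--             while j < n and lines[j].strip():
--                 j += 1
--             out.append('\n'.join(lines[i:j]))
--             i = j
--     return out
-- ===== Notes on version B (the rewrite author's own statement) =====
-- stated objective: alternative
-- what changed: Replaces A's single pass with a current-layout accumulator and end-of-loop flush by a two-pointer run scanner over the line list: it skips blank lines, scans each maximal non-blank run [i:j] in an inner loop and joins the slice directly, so no group accumulator or final flush exists.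
import Mathlib
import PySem

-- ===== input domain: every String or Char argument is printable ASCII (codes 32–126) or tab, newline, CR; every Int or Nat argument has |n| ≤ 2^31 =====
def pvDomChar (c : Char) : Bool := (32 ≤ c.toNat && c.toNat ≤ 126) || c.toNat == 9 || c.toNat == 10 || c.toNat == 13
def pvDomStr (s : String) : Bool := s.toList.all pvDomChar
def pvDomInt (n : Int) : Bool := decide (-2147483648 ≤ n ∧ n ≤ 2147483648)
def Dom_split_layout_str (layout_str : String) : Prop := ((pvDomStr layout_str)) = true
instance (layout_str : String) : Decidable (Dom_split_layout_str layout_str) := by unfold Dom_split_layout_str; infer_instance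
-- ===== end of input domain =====

-- B replaces A's accumulator-and-flush single pass by a two-pointer scan over maximal
-- non-blank runs of lines (objective: alternative decomposition; same cost).

-- ===== PORT A =====
-- one loop step of A: state = (out, current_layout)
def pvStepA (s : List (List String) × List String) (row : String) : List (List String) × List String :=
  if PySem.Str.strip row == "" then
    if s.2.isEmpty then s else (s.1 ++ [s.2], [])
  else (s.1, s.2 ++ [row])

-- A's trailing flush: "if current_layout: out.append(current_layout)"
def pvFinish (s : List (List String) × List String) : List (List String) :=
  if s.2.isEmpty then s.1 else s.1 ++ [s.2]

def split_layout_str (layout_str : String) : List String :=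
  let s := (PySem.Str.splitlines layout_str).foldl pvStepA ([], [])
  (pvFinish s).map (fun l => PySem.Str.join "\n" l)

-- ===== PORT B =====
-- inner while loop: advance j over non-blank lines
def pvScanRun (lines : List String) (j : Nat) : Nat :=
  if h : j < lines.length ∧ ¬ (PySem.Str.strip (lines.getD j "") == "") then
    pvScanRun lines (j + 1)
  else j
termination_by lines.length - j

theorem pvScanRun_ge (lines : List String) (j : Nat) : j ≤ pvScanRun lines j := by
  unfold pvScanRun
  split
  · exact le_trans (Nat.le_succ j) (pvScanRun_ge lines (j + 1))
  · exact Nat.le_refl j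
termination_by lines.length - j

-- outer while loop over i
def pvLoopB (lines : List String) (i : Nat) (out : List String) : List String :=
  if _h : i < lines.length then
    if PySem.Str.strip (lines.getD i "") == "" then
      pvLoopB lines (i + 1) out
    else
      let j := pvScanRun lines (i + 1)
      pvLoopB lines j
        (out ++ [PySem.Str.join "\n" (PySem.List.slice lines (some (i : Int)) (some (j : Int)))])
  else out
termination_by lines.length - i
decreasing_by
  · omega
  · have := pvScanRun_ge lines (i + 1); omega

def split_layout_str_alt (layout_str : String) : List String :=
  pvLoopB (PySem.Str.splitlines layout_str) 0 []

-- ===== PRECONDITION & SPEC =====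
def Spec_split_layout_str (layout_str : String) (out : List String) : Prop := out = split_layout_str_alt layout_str
instance (layout_str : String) (out : List String) : Decidable (Spec_split_layout_str layout_str out) := by unfold Spec_split_layout_str; infer_instance

-- ===== CLAIM (what is proved, stated in full; the proofs are below) =====
def Claim_equal_split_layout_str : Prop := ∀ (layout_str : String), Dom_split_layout_str layout_str → Spec_split_layout_str layout_str (split_layout_str layout_str)

-- ===== LEMMAS AND PROOFS =====

-- reference "groups" function used only in the proofs
def pvNb (r : String) : Bool := !(PySem.Str.strip r == "")

def pvG : List String → List String
  | [] => []
  | l :: ls =>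
    if PySem.Str.strip l == "" then pvG ls
    else PySem.Str.join "\n" (l :: ls.takeWhile pvNb) :: pvG (ls.dropWhile pvNb)
termination_by ls => ls.length
decreasing_by
  · simp only [List.length_cons]; omega
  · have := List.length_dropWhile_le (p := pvNb) (l := ls)
    simp only [List.length_cons]; omega

theorem pvTakeLenTakeWhile {α : Type} (p : α → Bool) (l : List α) :
    l.take (l.takeWhile p).length = l.takeWhile p := by
  induction l with
  | nil => simp
  | cons a l ih => by_cases h : p a <;> simp [h, ih]

theorem pvDropLenTakeWhile {α : Type} (p : α → Bool) (l : List α) :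
    l.drop (l.takeWhile p).length = l.dropWhile p := by
  induction l with
  | nil => simp
  | cons a l ih => by_cases h : p a <;> simp [h, ih]

theorem pvScanRun_eq (lines : List String) (j : Nat) :
    pvScanRun lines j = j + ((lines.drop j).takeWhile pvNb).length := by
  unfold pvScanRun
  split
  · rename_i h
    have hd : lines.drop j = lines[j] :: lines.drop (j + 1) :=
      List.drop_eq_getElem_cons h.1
    have hget : lines.getD j "" = lines[j] := List.getD_eq_getElem lines "" h.1
    have hnb : pvNb lines[j] = true := by
      unfold pvNb
      rw [← hget]
      simpa using h.2
    rw [pvScanRun_eq lines (j + 1), hd, List.takeWhile_cons, hnb]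
    simp; omega
  · rename_i h
    rcases Nat.lt_or_ge j lines.length with hlt | hge
    · have hd : lines.drop j = lines[j] :: lines.drop (j + 1) :=
        List.drop_eq_getElem_cons hlt
      have hget : lines.getD j "" = lines[j] := List.getD_eq_getElem lines "" hlt
      have hnb : pvNb lines[j] = false := by
        have hbl : (PySem.Str.strip (lines.getD j "") == "") = true := by
          by_contra hc
          exact h ⟨hlt, fun hh => hc hh⟩
        unfold pvNb
        rw [← hget, hbl]
        rfl
      rw [hd, List.takeWhile_cons, hnb]; simp
    · rw [List.drop_eq_nil_of_le hge]; simp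
termination_by lines.length - j

theorem pvLoopB_eq (lines : List String) (i : Nat) (out : List String) :
    pvLoopB lines i out = out ++ pvG (lines.drop i) := by
  unfold pvLoopB
  split
  · rename_i hlt
    have hd : lines.drop i = lines[i] :: lines.drop (i + 1) :=
      List.drop_eq_getElem_cons hlt
    have hget : lines.getD i "" = lines[i] := List.getD_eq_getElem lines "" hlt
    split
    · rename_i hb
      rw [pvLoopB_eq lines (i + 1) out, hd]
      rw [pvG, if_pos (by rw [← hget]; exact hb)]
    · rename_i hb
      have hj : pvScanRun lines (i + 1)
          = (i + 1) + ((lines.drop (i + 1)).takeWhile pvNb).length := pvScanRun_eq _ _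
      rw [pvLoopB_eq lines (pvScanRun lines (i + 1)) _, hj]
      have hslice : PySem.List.slice lines (some (i : Int))
            (some (((i + 1) + ((lines.drop (i + 1)).takeWhile pvNb).length : Nat) : Int))
          = lines[i] :: (lines.drop (i + 1)).takeWhile pvNb := by
        rw [PySem.List.slice_natCast, hd]
        have harith : (i + 1) + ((lines.drop (i + 1)).takeWhile pvNb).length - i
            = ((lines.drop (i + 1)).takeWhile pvNb).length + 1 := by omega
        rw [harith, List.take_succ_cons]
        congr 1
        exact pvTakeLenTakeWhile pvNb _
      have hdrop : lines.drop ((i + 1) + ((lines.drop (i + 1)).takeWhile pvNb).length)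
          = (lines.drop (i + 1)).dropWhile pvNb := by
        have hdd : lines.drop ((i + 1) + ((lines.drop (i + 1)).takeWhile pvNb).length)
            = (lines.drop (i + 1)).drop ((lines.drop (i + 1)).takeWhile pvNb).length := by
          rw [List.drop_drop]
        rw [hdd]
        exact pvDropLenTakeWhile pvNb _
      rw [hslice, hdrop, hd, pvG, if_neg (by rw [← hget]; exact hb)]
      simp
  · rename_i hge
    rw [List.drop_eq_nil_of_le (by omega)]
    simp [pvG]
termination_by lines.length - i
decreasing_by
  · omega
  · have := pvScanRun_ge lines (i + 1); omega

theorem pvFoldA_prefix (ls : List String) (out : List (List String)) (cur : List String) :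
    pvFinish (ls.foldl pvStepA (out, cur)) = out ++ pvFinish (ls.foldl pvStepA ([], cur)) := by
  induction ls generalizing out cur with
  | nil =>
    simp only [List.foldl_nil, pvFinish]
    split <;> simp
  | cons l ls ih =>
    simp only [List.foldl_cons]
    by_cases hb : PySem.Str.strip l == ""
    · by_cases hc : cur.isEmpty
      · have h1 : pvStepA (out, cur) l = (out, cur) := by simp [pvStepA, hb, hc]
        have h2 : pvStepA ([], cur) l = ([], cur) := by simp [pvStepA, hb, hc]
        rw [h1, h2]; exact ih out cur
      · have h1 : pvStepA (out, cur) l = (out ++ [cur], []) := by simp [pvStepA, hb, hc]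
        have h2 : pvStepA ([], cur) l = ([cur], []) := by simp [pvStepA, hb, hc]
        rw [h1, h2, ih (out ++ [cur]) [], ih [cur] []]
        simp
    · have h1 : pvStepA (out, cur) l = (out, cur ++ [l]) := by simp [pvStepA, hb]
      have h2 : pvStepA ([], cur) l = ([], cur ++ [l]) := by simp [pvStepA, hb]
      rw [h1, h2]; exact ih out (cur ++ [l])

theorem pvFoldA_main (ls : List String) (cur : List String) :
    (pvFinish (ls.foldl pvStepA ([], cur))).map (fun l => PySem.Str.join "\n" l)
      = if cur.isEmpty then pvG ls
        else PySem.Str.join "\n" (cur ++ ls.takeWhile pvNb) :: pvG (ls.dropWhile pvNb) := by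
  induction ls generalizing cur with
  | nil =>
    simp only [List.foldl_nil, pvFinish]
    by_cases hc : cur.isEmpty
    · simp [hc, pvG]
    · simp [hc, pvG]
  | cons l ls ih =>
    simp only [List.foldl_cons]
    by_cases hb : PySem.Str.strip l == ""
    · have hnbl : pvNb l = false := by simp [pvNb, hb]
      have hG : pvG (l :: ls) = pvG ls := by rw [pvG, if_pos hb]
      by_cases hc : cur.isEmpty
      · have h2 : pvStepA ([], cur) l = ([], cur) := by simp [pvStepA, hb, hc]
        rw [h2, ih cur]
        simp [hc, hG]
      · have h2 : pvStepA ([], cur) l = ([cur], []) := by simp [pvStepA, hb, hc]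
        rw [h2, pvFoldA_prefix ls [cur] []]
        simp only [List.map_append]
        rw [ih []]
        simp only [List.isEmpty_nil, if_neg hc]
        rw [List.takeWhile_cons, List.dropWhile_cons]
        simp only [hnbl, Bool.false_eq_true, if_neg (by simp : ¬False)]
        rw [hG]
        simp
    · have hnbl : pvNb l = true := by simp [pvNb, hb]
      have hG : pvG (l :: ls) = PySem.Str.join "\n" (l :: ls.takeWhile pvNb) :: pvG (ls.dropWhile pvNb) := by
        rw [pvG, if_neg hb]
      have h2 : pvStepA ([], cur) l = ([], cur ++ [l]) := by simp [pvStepA, hb]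
      rw [h2, ih (cur ++ [l])]
      rw [if_neg (by simp)]
      rw [List.takeWhile_cons, List.dropWhile_cons]
      simp only [hnbl]
      by_cases hc : cur.isEmpty
      · have hcur : cur = [] := List.isEmpty_iff.mp hc
        subst hcur
        simp [hG]
      · simp [hc]

-- ===== VERDICT (by name: the statement is the Claim_ definition above) =====
theorem split_layout_str_spec : Claim_equal_split_layout_str := by
  intro s _
  unfold Spec_split_layout_str split_layout_str split_layout_str_alt
  rw [pvLoopB_eq]
  simp only [List.drop_zero, List.nil_append]
  have := pvFoldA_main (PySem.Str.splitlines s) []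
  simpa using this
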